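-- pv_equiv track=rewrite | github.com/hapax-systems/hapax-council | agents/cold_contact/candidate_registry.py | _orcid_checksum_valid
-- ===== SOURCE A (Python) =====
-- def _orcid_checksum_valid(orcid: str) -> bool:
--     """Return whether ``orcid`` satisfies ISO 7064 MOD 11-2."""
--     compact = orcid.replace("-", "")
--     total = 0
--     for char in compact[:-1]:
--         total = (total + int(char)) * 2
--     result = (12 - (total % 11)) % 11
--     expected = "X" if result == 10 else str(result)
--     return compact[-1] == expected
-- ===== SOURCE B (Python) =====
-- def _orcid_checksum_valid(orcid: str) -> bool:
--     """Return whether ``orcid`` satisfies ISO 7064 MOD 11-2.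
--
--     Single modular invariant: build the weighted sum back-to-front (weights
--     4, 8, 16, ... over the leading digits), fold the check character itself in
--     with weight 2 ('X' counting as 10), and test total % 11 == 2, instead of
--     recomputing the expected check character and comparing strings.
--     """
--     compact = orcid.replace("-", "")
--     last = compact[-1]
--     total = 0
--     weight = 4
--     for char in reversed(compact[:-1]):
--         total += int(char) * weight
--         weight *= 2
--     if last == "X":
--         total += 2 * 10
--     elif "0" <= last <= "9":
--         total += 2 * (ord(last) - ord("0"))
--     else:
--         return False
--     return total % 11 == 2
-- ===== Notes on version B (the rewrite author's own statement) =====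
-- stated objective: alternative
-- what changed: B validates by folding the check character itself into a back-to-front weighted sum (weights 2,4,8,... with 'X'->10) and testing the single modular invariant total % 11 == 2, instead of A's forward doubling accumulator over the leading digits followed by reconstructing the expected check character and comparing strings.
import Mathlib
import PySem

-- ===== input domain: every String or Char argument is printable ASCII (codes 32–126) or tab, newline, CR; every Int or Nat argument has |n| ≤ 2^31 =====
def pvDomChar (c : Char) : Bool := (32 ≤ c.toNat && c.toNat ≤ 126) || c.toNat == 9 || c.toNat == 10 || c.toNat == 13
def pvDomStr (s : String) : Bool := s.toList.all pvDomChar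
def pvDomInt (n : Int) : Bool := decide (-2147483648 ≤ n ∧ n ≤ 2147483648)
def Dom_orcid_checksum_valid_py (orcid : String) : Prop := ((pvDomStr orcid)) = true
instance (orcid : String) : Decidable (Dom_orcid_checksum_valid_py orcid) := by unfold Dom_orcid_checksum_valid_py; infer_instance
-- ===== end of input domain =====

-- B replaces A's forward doubling loop plus expected-check-character reconstruction and string
-- comparison by a back-to-front weighted sum that folds the check character itself into the total
-- and tests the single modular invariant total % 11 == 2 (objective: alternative, same cost).

-- int(char) on a one-character string (Pre_ guarantees it succeeds on every interior character)
def pvDigitVal (c : Char) : Int := (PySem.Int.ofChars? [c]).getD 0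

-- ===== PORT A =====
def orcid_checksum_valid_py (orcid : String) : Bool :=
  let compact := PySem.Chars.replace orcid.toList ['-'] []
  let total := (PySem.List.slice compact none (some (-1))).foldl
      (fun t c => (t + pvDigitVal c) * 2) 0
  let result := PySem.Int.mod (12 - PySem.Int.mod total 11) 11
  let expected : List Char := if result == 10 then ['X'] else PySem.Int.toChars result
  match PySem.List.pyGet? compact (-1) with   -- compact[-1]; none = IndexError, excluded by Pre_
  | some c => [c] == expected
  | none => false

-- ===== PORT B =====
def orcid_checksum_valid_py_alt (orcid : String) : Bool :=
  let compact := PySem.Chars.replace orcid.toList ['-'] []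
  match PySem.List.pyGet? compact (-1) with   -- last = compact[-1]; none = IndexError, excluded by Pre_
  | none => false
  | some last =>
    -- total/weight loop over reversed(compact[:-1]) with weights 4, 8, 16, …
    let p := ((PySem.List.slice compact none (some (-1))).reverse).foldl
        (fun (tw : Int × Int) c => (tw.1 + pvDigitVal c * tw.2, tw.2 * 2)) (0, 4)
    if last = 'X' then
      PySem.Int.mod (p.1 + 2 * 10) 11 == 2
    else if '0' ≤ last ∧ last ≤ '9' then
      PySem.Int.mod (p.1 + 2 * ((last.toNat : Int) - 48)) 11 == 2   -- 2 * (ord(last) - ord("0"))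
    else
      false

-- ===== PRECONDITION & SPEC =====
-- Pre_ excludes exactly the inputs where Python A raises: an empty compacted string
-- (IndexError on compact[-1]) or a non-last compacted character int() rejects (ValueError).
def Pre_orcid_checksum_valid_py (orcid : String) : Prop :=
  PySem.Chars.replace orcid.toList ['-'] [] ≠ [] ∧
  (PySem.Chars.replace orcid.toList ['-'] []).dropLast.all
    (fun c => (PySem.Int.ofChars? [c]).isSome) = true
instance (orcid : String) : Decidable (Pre_orcid_checksum_valid_py orcid) := by
  unfold Pre_orcid_checksum_valid_py; infer_instance
def pvWitness_orcid_checksum_valid_py : String := "042"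

def Spec_orcid_checksum_valid_py (orcid : String) (out : Bool) : Prop := out = orcid_checksum_valid_py_alt orcid
instance (orcid : String) (out : Bool) : Decidable (Spec_orcid_checksum_valid_py orcid out) := by unfold Spec_orcid_checksum_valid_py; infer_instance

-- ===== CLAIM (what is proved, stated in full; the proofs are below) =====
def Claim_equal_orcid_checksum_valid_py : Prop := ∀ (orcid : String), Dom_orcid_checksum_valid_py orcid → Pre_orcid_checksum_valid_py orcid → Spec_orcid_checksum_valid_py orcid (orcid_checksum_valid_py orcid)

-- ===== LEMMAS AND PROOFS =====

theorem char_beq_toNat (c d : Char) : (c == d) = decide (c.toNat = d.toNat) := by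
  by_cases h : c = d
  · subst h; simp
  · have hn : c.toNat ≠ d.toNat := fun hn => h (Char.ext (UInt32.toNat_inj.mp hn))
    simp [h, hn]

theorem char_le_toNat (c d : Char) : (c ≤ d) ↔ c.toNat ≤ d.toNat := by
  rw [Char.le_def]; exact UInt32.le_iff_toNat_le

-- A's loop with an arbitrary starting accumulator
theorem fold_shift (l : List Char) (a : Int) :
    l.foldl (fun t c => (t + pvDigitVal c) * 2) a
      = 2 ^ l.length * a + l.foldl (fun t c => (t + pvDigitVal c) * 2) 0 := by
  induction l generalizing a with
  | nil => simp
  | cons c tl ih =>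
    simp only [List.foldl_cons, List.length_cons]
    rw [ih ((a + pvDigitVal c) * 2), ih ((0 + pvDigitVal c) * 2)]
    ring

-- B's reversed weighted loop equals t0 plus half its initial weight times A's total
theorem rev_fold (l : List Char) (t0 u : Int) :
    l.reverse.foldl (fun (tw : Int × Int) c => (tw.1 + pvDigitVal c * tw.2, tw.2 * 2)) (t0, 2 * u)
      = (t0 + u * l.foldl (fun t c => (t + pvDigitVal c) * 2) 0, 2 * u * 2 ^ l.length) := by
  induction l generalizing t0 u with
  | nil => simp
  | cons c tl ih =>
    simp only [List.reverse_cons, List.foldl_append, List.foldl_cons, List.foldl_nil,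
      List.length_cons]
    rw [ih, fold_shift tl ((0 + pvDigitVal c) * 2)]
    apply Prod.ext <;> simp <;> ring

-- a single character compared with a digit character, rephrased on code points
theorem beq_digit_char (c d : Char) (h1 : 48 ≤ d.toNat) (h2 : d.toNat ≤ 57) :
    (c == d) = (if c = 'X' then false
                else if '0' ≤ c ∧ c ≤ '9' then decide (((c.toNat : Int)) - 48 = (d.toNat : Int) - 48)
                else false) := by
  rw [char_beq_toNat]
  split_ifs with hX hd
  · subst hX
    have h88 : ('X').toNat = 88 := rfl
    simp only [decide_eq_false_iff_not, h88]; omega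
  · rw [char_le_toNat, char_le_toNat] at hd
    have : (48:Nat) ≤ c.toNat ∧ c.toNat ≤ 57 := by simpa using hd
    rw [decide_eq_decide]; omega
  · rw [char_le_toNat, char_le_toNat] at hd
    simp only [decide_eq_false_iff_not]
    intro hn
    exact hd (by simp; omega)

-- A's string comparison against the expected check character, as B's branch structure
theorem char_eq_of_toNat (c d : Char) (h : c.toNat = d.toNat) : c = d :=
  Char.ext (UInt32.toNat_inj.mp h)

theorem beq_X_char (c : Char) :
    (c == 'X') = (if c = 'X' then decide ((10:Int) = 10)
                  else if '0' ≤ c ∧ c ≤ '9' then decide (((c.toNat : Int)) - 48 = 10)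
                  else false) := by
  rw [char_beq_toNat]
  split_ifs with hX hd
  · subst hX; simp
  · rw [char_le_toNat, char_le_toNat] at hd
    have hb : (48:Nat) ≤ c.toNat ∧ c.toNat ≤ 57 := by simpa using hd
    have h88 : ('X').toNat = 88 := rfl
    rw [decide_eq_decide]; omega
  · simp only [decide_eq_false_iff_not]
    intro h
    exact hX (char_eq_of_toNat c 'X' h)

theorem expected_eq (r : Int) (h0 : 0 ≤ r) (h1 : r ≤ 10) (c : Char) :
    ([c] == (if r == 10 then ['X'] else PySem.Int.toChars r)) =
      (if c = 'X' then decide (r = 10)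
       else if '0' ≤ c ∧ c ≤ '9' then decide (((c.toNat : Int)) - 48 = r)
       else false) := by
  interval_cases r
  · simp only [show ((0:Int) == 10) = false from rfl, Bool.false_eq_true, if_false,
      show PySem.Int.toChars (0:Int) = ['0'] from by decide,
      List.cons_beq_cons, BEq.rfl, Bool.and_true]
    rw [beq_digit_char c '0' (by decide) (by decide)]
    simp only [show ('0').toNat = 48 from rfl]
    norm_num
  · simp only [show ((1:Int) == 10) = false from rfl, Bool.false_eq_true, if_false,
      show PySem.Int.toChars (1:Int) = ['1'] from by decide,
      List.cons_beq_cons, BEq.rfl, Bool.and_true]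
    rw [beq_digit_char c '1' (by decide) (by decide)]
    simp only [show ('1').toNat = 49 from rfl]
    norm_num
  · simp only [show ((2:Int) == 10) = false from rfl, Bool.false_eq_true, if_false,
      show PySem.Int.toChars (2:Int) = ['2'] from by decide,
      List.cons_beq_cons, BEq.rfl, Bool.and_true]
    rw [beq_digit_char c '2' (by decide) (by decide)]
    simp only [show ('2').toNat = 50 from rfl]
    norm_num
  · simp only [show ((3:Int) == 10) = false from rfl, Bool.false_eq_true, if_false,
      show PySem.Int.toChars (3:Int) = ['3'] from by decide,
      List.cons_beq_cons, BEq.rfl, Bool.and_true]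
    rw [beq_digit_char c '3' (by decide) (by decide)]
    simp only [show ('3').toNat = 51 from rfl]
    norm_num
  · simp only [show ((4:Int) == 10) = false from rfl, Bool.false_eq_true, if_false,
      show PySem.Int.toChars (4:Int) = ['4'] from by decide,
      List.cons_beq_cons, BEq.rfl, Bool.and_true]
    rw [beq_digit_char c '4' (by decide) (by decide)]
    simp only [show ('4').toNat = 52 from rfl]
    norm_num
  · simp only [show ((5:Int) == 10) = false from rfl, Bool.false_eq_true, if_false,
      show PySem.Int.toChars (5:Int) = ['5'] from by decide,
      List.cons_beq_cons, BEq.rfl, Bool.and_true]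
    rw [beq_digit_char c '5' (by decide) (by decide)]
    simp only [show ('5').toNat = 53 from rfl]
    norm_num
  · simp only [show ((6:Int) == 10) = false from rfl, Bool.false_eq_true, if_false,
      show PySem.Int.toChars (6:Int) = ['6'] from by decide,
      List.cons_beq_cons, BEq.rfl, Bool.and_true]
    rw [beq_digit_char c '6' (by decide) (by decide)]
    simp only [show ('6').toNat = 54 from rfl]
    norm_num
  · simp only [show ((7:Int) == 10) = false from rfl, Bool.false_eq_true, if_false,
      show PySem.Int.toChars (7:Int) = ['7'] from by decide,
      List.cons_beq_cons, BEq.rfl, Bool.and_true]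
    rw [beq_digit_char c '7' (by decide) (by decide)]
    simp only [show ('7').toNat = 55 from rfl]
    norm_num
  · simp only [show ((8:Int) == 10) = false from rfl, Bool.false_eq_true, if_false,
      show PySem.Int.toChars (8:Int) = ['8'] from by decide,
      List.cons_beq_cons, BEq.rfl, Bool.and_true]
    rw [beq_digit_char c '8' (by decide) (by decide)]
    simp only [show ('8').toNat = 56 from rfl]
    norm_num
  · simp only [show ((9:Int) == 10) = false from rfl, Bool.false_eq_true, if_false,
      show PySem.Int.toChars (9:Int) = ['9'] from by decide,
      List.cons_beq_cons, BEq.rfl, Bool.and_true]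
    rw [beq_digit_char c '9' (by decide) (by decide)]
    simp only [show ('9').toNat = 57 from rfl]
    norm_num
  · simp only [show ((10:Int) == 10) = true from rfl, if_true,
      List.cons_beq_cons, BEq.rfl, Bool.and_true]
    exact beq_X_char c

-- ===== VERDICT (by name: the statement is the Claim_ definition above) =====
theorem int_beq_decide (a b : Int) : (a == b) = decide (a = b) := by
  by_cases h : a = b <;> simp [h]

theorem orcid_checksum_valid_py_spec : Claim_equal_orcid_checksum_valid_py := by
  intro orcid _ _
  unfold Spec_orcid_checksum_valid_py orcid_checksum_valid_py orcid_checksum_valid_py_alt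
  simp only [PySem.List.slice_to_neg_one]
  set cs := PySem.Chars.replace orcid.toList ['-'] [] with hcs
  set T := cs.dropLast.foldl (fun t c => (t + pvDigitVal c) * 2) 0 with hT
  cases hg : PySem.List.pyGet? cs (-1) with
  | none => rfl
  | some last =>
    have h0 : 0 ≤ PySem.Int.mod (12 - PySem.Int.mod T 11) 11 :=
      PySem.Int.mod_nonneg _ (by norm_num)
    have h1 : PySem.Int.mod (12 - PySem.Int.mod T 11) 11 < 11 :=
      PySem.Int.mod_lt _ (by norm_num)
    dsimp only
    rw [expected_eq _ h0 (by omega) last,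
      show ((0:Int), (4:Int)) = ((0:Int), 2 * 2) from by norm_num, rev_fold]
    split_ifs with hX hd
    · rw [int_beq_decide, decide_eq_decide]
      simp only [show ∀ a : Int, PySem.Int.mod a 11 = a % 11 from
          fun a => PySem.Int.mod_eq_emod_of_pos (by norm_num)] at h0 h1 ⊢
      omega
    · have hb1 : ('0').toNat ≤ last.toNat := (char_le_toNat '0' last).mp hd.1
      have hb2 : last.toNat ≤ ('9').toNat := (char_le_toNat last '9').mp hd.2
      have e1 : ('0').toNat = 48 := rfl
      have e2 : ('9').toNat = 57 := rfl
      rw [int_beq_decide, decide_eq_decide]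
      simp only [show ∀ a : Int, PySem.Int.mod a 11 = a % 11 from
          fun a => PySem.Int.mod_eq_emod_of_pos (by norm_num)] at h0 h1 ⊢
      omega
    · rfl
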